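-- pv_equiv track=rewrite | github.com/medu1122/learn | pert_python/bai8.py | dayDanDauDaiNhat
-- ===== SOURCE A (Python) =====
-- def dayDanDauDaiNhat(arr):
--     if len(arr) < 2:
--         return 0
--
--     max_length = 0
--     current_length = 1  # Start with the first element
--
--     for i in range(1, len(arr)):
--         # Check if current element and previous element have alternating signs
--         # (their product is negative)
--         if arr[i] * arr[i-1] < 0:
--             current_length += 1
--         else:
--             # Reset count if signs are not alternating
--             current_length = 1
--
--         # Update max_length if current_length is larger
--         if current_length > max_length:
--             max_length = current_length
--
--     return max_length
-- ===== SOURCE B (Python) =====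
-- def _scan(flags):
--     # right fold over flags: (length of leading True run, length of longest True run)
--     lead, best = 0, 0
--     for f in reversed(flags):
--         if f:
--             lead, best = lead + 1, max(lead + 1, best)
--         else:
--             lead = 0
--     return (lead, best)
--
-- def dayDanDauDaiNhat(arr):
--     if len(arr) < 2:
--         return 0
--     flags = [arr[i] * arr[i-1] < 0 for i in range(1, len(arr))]
--     return _scan(flags)[1] + 1
-- ===== Notes on version B (the rewrite author's own statement) =====
-- stated objective: alternative
-- what changed: A's single running current-length/max-length loop is replaced by building the list of alternation flags (adjacent product < 0) and computing the longest True run with a recursive scan returning (leading run, best run), then adding 1.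
import Mathlib
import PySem

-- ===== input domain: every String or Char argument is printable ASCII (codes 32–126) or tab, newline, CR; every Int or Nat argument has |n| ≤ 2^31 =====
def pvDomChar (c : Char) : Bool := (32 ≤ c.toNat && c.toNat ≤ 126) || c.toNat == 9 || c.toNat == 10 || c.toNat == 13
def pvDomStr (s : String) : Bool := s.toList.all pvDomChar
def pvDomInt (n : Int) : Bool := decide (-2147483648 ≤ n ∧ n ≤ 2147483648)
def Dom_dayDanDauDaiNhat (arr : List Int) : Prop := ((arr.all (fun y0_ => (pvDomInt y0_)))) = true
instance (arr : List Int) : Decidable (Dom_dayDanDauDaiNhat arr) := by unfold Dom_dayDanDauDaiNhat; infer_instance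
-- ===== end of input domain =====

-- B replaces A's running current/max loop by a flag list (adjacent products < 0) and a
-- recursive scan returning (leading-run, longest-run) of True flags; alternative decomposition.


-- ===== PORT A =====
def dayDanDauDaiNhat (arr : List Int) : Int :=
  if arr.length < 2 then 0
  else
    -- for i in range(1, len(arr)): state = (max_length, current_length)
    let r := (PySem.List.pyRange 1 (arr.length : Int) 1).foldl
      (fun (st : Int × Int) (i : Int) =>
        let current := if PySem.List.pyGetD arr i 0 * PySem.List.pyGetD arr (i - 1) 0 < 0
                       then st.2 + 1 else 1
        let mx := if current > st.1 then current else st.1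
        (mx, current)) (0, 1)
    r.1

-- ===== PORT B =====
-- _scan(flags): right fold (loop over reversed flags) computing
-- (leading True-run length, longest True-run length)
def pvScanStep (p : Int × Int) (f : Bool) : Int × Int :=
  if f then (p.1 + 1, max (p.1 + 1) p.2) else (0, p.2)

def pvScan (flags : List Bool) : Int × Int :=
  flags.reverse.foldl pvScanStep (0, 0)

def dayDanDauDaiNhat_alt (arr : List Int) : Int :=
  if arr.length < 2 then 0
  else
    let flags := (PySem.List.pyRange 1 (arr.length : Int) 1).map
      (fun (i : Int) => decide (PySem.List.pyGetD arr i 0 * PySem.List.pyGetD arr (i - 1) 0 < 0))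
    (pvScan flags).2 + 1

-- ===== PRECONDITION & SPEC =====
def Spec_dayDanDauDaiNhat (arr : List Int) (out : Int) : Prop := out = dayDanDauDaiNhat_alt arr
instance (arr : List Int) (out : Int) : Decidable (Spec_dayDanDauDaiNhat arr out) := by unfold Spec_dayDanDauDaiNhat; infer_instance

-- ===== CLAIM (what is proved, stated in full; the proofs are below) =====
def Claim_equal_dayDanDauDaiNhat : Prop := ∀ (arr : List Int), Dom_dayDanDauDaiNhat arr → Spec_dayDanDauDaiNhat arr (dayDanDauDaiNhat arr)

-- ===== LEMMAS AND PROOFS =====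

-- A's loop body as a function of the current flag
def pvStepA (st : Int × Int) (f : Bool) : Int × Int :=
  let current := if f then st.2 + 1 else 1
  let mx := if current > st.1 then current else st.1
  (mx, current)

lemma pvScan_nil : pvScan [] = (0, 0) := rfl

lemma pvScan_cons (f : Bool) (rest : List Bool) :
    pvScan (f :: rest) = pvScanStep (pvScan rest) f := by
  simp [pvScan, List.reverse_cons, List.foldl_append]

lemma pvScan_facts (l : List Bool) :
    0 ≤ (pvScan l).1 ∧ (pvScan l).1 ≤ (pvScan l).2 := by
  induction l with
  | nil => simp [pvScan_nil]
  | cons f rest ih =>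
    rw [pvScan_cons]
    cases f <;> simp [pvScanStep] <;> omega

lemma pvFoldA_inv (l : List Bool) : ∀ mx cur : Int, 1 ≤ cur → 1 ≤ mx → cur ≤ mx →
    (l.foldl pvStepA (mx, cur)).1
      = max mx (max (cur + (pvScan l).1) (1 + (pvScan l).2)) := by
  induction l with
  | nil => intro mx cur h1 h2 h3; simp [pvScan_nil]; omega
  | cons f rest ih =>
    intro mx cur h1 h2 h3
    have hs := pvScan_facts rest
    cases f
    · simp only [List.foldl_cons, pvStepA, if_false, Bool.false_eq_true, if_neg (by omega : ¬ (1:Int) > mx)]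
      rw [ih mx 1 le_rfl h2 h2]
      simp [pvScan_cons, pvScanStep]
      omega
    · simp only [List.foldl_cons, pvStepA, if_true]
      by_cases h : cur + 1 > mx
      · rw [if_pos h, ih (cur + 1) (cur + 1) (by omega) (by omega) le_rfl]
        simp [pvScan_cons, pvScanStep]; omega
      · rw [if_neg h, ih mx (cur + 1) (by omega) h2 (by omega)]
        simp [pvScan_cons, pvScanStep]; omega

lemma pvStepA_eq (arr : List Int) :
    (fun (st : Int × Int) (i : Int) =>
        let current := if PySem.List.pyGetD arr i 0 * PySem.List.pyGetD arr (i - 1) 0 < 0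
                       then st.2 + 1 else 1
        let mx := if current > st.1 then current else st.1
        (mx, current))
      = fun st i => pvStepA st (decide (PySem.List.pyGetD arr i 0 * PySem.List.pyGetD arr (i - 1) 0 < 0)) := by
  funext st i
  simp [pvStepA]

-- ===== VERDICT (by name: the statement is the Claim_ definition above) =====
theorem dayDanDauDaiNhat_spec : Claim_equal_dayDanDauDaiNhat := by
  intro arr _
  unfold Spec_dayDanDauDaiNhat dayDanDauDaiNhat dayDanDauDaiNhat_alt
  by_cases h : arr.length < 2
  · simp [h]
  · rw [if_neg h, if_neg h]
    simp only [pvStepA_eq arr, ← List.foldl_map]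
    set flags := (PySem.List.pyRange 1 (arr.length : Int) 1).map
      (fun (i : Int) => decide (PySem.List.pyGetD arr i 0 * PySem.List.pyGetD arr (i - 1) 0 < 0)) with hflags
    have hlen : flags.length = ((arr.length : Int) - 1).toNat := by
      simp [hflags, PySem.List.length_pyRange_one]
    have hne : flags ≠ [] := by
      intro hnil
      rw [hnil] at hlen
      simp at hlen
      omega
    obtain ⟨f, rest, hfr⟩ := List.exists_cons_of_ne_nil hne
    rw [hfr]
    have hs := pvScan_facts rest
    cases f
    · simp only [List.foldl_cons, pvStepA, if_false, Bool.false_eq_true]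
      norm_num
      rw [pvFoldA_inv rest 1 1 le_rfl le_rfl le_rfl]
      simp [pvScan_cons, pvScanStep]
      omega
    · simp only [List.foldl_cons, pvStepA, if_true]
      norm_num
      rw [pvFoldA_inv rest 2 2 (by omega) (by omega) le_rfl]
      simp [pvScan_cons, pvScanStep]
      omega
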